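-- pv_equiv track=rewrite | github.com/pypi-data/pypi-mirror-390 | packages/cardiotensor/cardiotensor-1.1.5.tar.gz/cardiotensor-1.1.5/src/cardiotensor/utils/am_utils.py | _sanitize_field_name
-- ===== SOURCE A (Python) =====
-- def _sanitize_field_name(name: str, param: str) -> str:
--     """
--     Amira field names should be simple symbols without spaces or quotes.
--     This is a light sanitization that preserves common names like HA, IA, AZ, EL.
--     """
--     if not isinstance(name, str) or len(name.strip()) == 0:
--         raise ValueError(f"{param} must be a non-empty string")
--     name = name.strip()
--     # Replace spaces and forbidden chars
--     bad = set(" \t\r\n\"'{}[]()@")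
--     if any(ch in bad for ch in name):
--         name = "".join(ch if ch not in bad else "_" for ch in name)
--     return name
-- ===== SOURCE B (Python) =====
-- _BAD = " \t\r\n\"'{}[]()@"
--
--
-- def _sanitize_field_name(name: str, param: str) -> str:
--     if not isinstance(name, str) or len(name.strip()) == 0:
--         raise ValueError(f"{param} must be a non-empty string")
--     rest = name.strip()
--     parts = []
--     while True:
--         # locate the next forbidden character in the remainder
--         i = -1
--         for j, ch in enumerate(rest):
--             if ch in _BAD:
--                 i = j
--                 break
--         if i < 0:
--             parts.append(rest)
--             return "".join(parts)
--         # keep the clean slice wholesale, splice in "_", continue after it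
--         parts.append(rest[:i])
--         parts.append("_")
--         rest = rest[i + 1:]
-- ===== Notes on version B (the rewrite author's own statement) =====
-- stated objective: alternative
-- what changed: Replaces A's any-guard plus per-character conditional join with a recursion that locates each next forbidden character, keeps the clean slice before it wholesale, splices in '_' and recurses on the remainder.
import Mathlib
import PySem

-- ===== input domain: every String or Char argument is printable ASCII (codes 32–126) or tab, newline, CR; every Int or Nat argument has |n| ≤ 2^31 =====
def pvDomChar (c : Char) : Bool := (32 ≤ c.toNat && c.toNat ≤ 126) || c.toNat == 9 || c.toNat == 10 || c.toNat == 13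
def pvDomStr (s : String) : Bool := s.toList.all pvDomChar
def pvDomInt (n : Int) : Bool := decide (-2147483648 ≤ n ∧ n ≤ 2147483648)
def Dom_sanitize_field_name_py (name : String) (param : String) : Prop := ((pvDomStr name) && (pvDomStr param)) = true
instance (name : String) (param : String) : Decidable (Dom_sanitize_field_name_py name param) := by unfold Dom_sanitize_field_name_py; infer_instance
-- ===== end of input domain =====

-- B replaces A's any-guard plus per-character conditional join with a loop that locates the
-- next forbidden character, keeps the clean slice before it wholesale, splices in "_" and
-- continues on the remainder (alternative decomposition; same validation and result).

-- ===== PORT A =====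
-- bad = set(" \t\r\n\"'{}[]()@")
def pvBadA : PySem.Set Char := PySem.Set.ofList " \t\r\n\"'{}[]()@".toList

def sanitize_field_name_py (name : String) (param : String) : String :=
  let n := PySem.Str.strip name
  if n.toList.any (fun ch => PySem.Set.contains pvBadA ch) then
    String.ofList (n.toList.map (fun ch => if !(PySem.Set.contains pvBadA ch) then ch else '_'))
  else n

-- ===== PORT B =====
-- ch in _BAD on a single char = membership in the string's characters (exact here)
def pvIsBadB (ch : Char) : Bool := " \t\r\n\"'{}[]()@".toList.contains ch

-- the while-loop of Source B as tail recursion on (rest, parts); the inner enumerate-and-break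
-- search for the first forbidden index is List.findIdx?; rest[:i] / rest[i+1:] are
-- List.take i / List.drop (i+1), exact since 0 ≤ i < len(rest); "".join(parts) is Str.join "".
def pvFixGo (rest : List Char) (parts : List String) : String :=
  match h : rest.findIdx? pvIsBadB with
  | none => PySem.Str.join "" (parts ++ [String.ofList rest])
  | some i =>
      pvFixGo (rest.drop (i + 1))
        (parts ++ [String.ofList (rest.take i), "_"])
  termination_by rest.length
  decreasing_by
    have hi : i < rest.length := (List.findIdx?_eq_some_iff_findIdx_eq.mp h).1
    simp [List.length_drop]; omega

def sanitize_field_name_py_alt (name : String) (param : String) : String :=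
  pvFixGo (PySem.Str.strip name).toList []

-- ===== PRECONDITION & SPEC =====
-- A (and B alike) raise ValueError exactly when name.strip() is empty; those inputs are excluded.
def Pre_sanitize_field_name_py (name : String) (param : String) : Prop :=
  PySem.Str.strip name ≠ ""
instance (name : String) (param : String) : Decidable (Pre_sanitize_field_name_py name param) := by
  unfold Pre_sanitize_field_name_py; infer_instance

def pvWitness_sanitize_field_name_py : String × String := ("a b", "field")

def Spec_sanitize_field_name_py (name : String) (param : String) (out : String) : Prop := out = sanitize_field_name_py_alt name param
instance (name : String) (param : String) (out : String) : Decidable (Spec_sanitize_field_name_py name param out) := by unfold Spec_sanitize_field_name_py; infer_instance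

-- ===== CLAIM (what is proved, stated in full; the proofs are below) =====
def Claim_equal_sanitize_field_name_py : Prop := ∀ (name : String) (param : String), Dom_sanitize_field_name_py name param → Pre_sanitize_field_name_py name param → Spec_sanitize_field_name_py name param (sanitize_field_name_py name param)

-- ===== LEMMAS AND PROOFS =====

-- the common value both ports compute: replace each forbidden char by '_'
def pvSubst (cs : List Char) : List Char :=
  cs.map (fun c => if pvIsBadB c then '_' else c)

theorem pv_join_empty (parts : List (List Char)) :
    PySem.Chars.join [] parts = parts.flatten := by
  induction parts with
  | nil => simp [PySem.Chars.join, List.intercalate]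
  | cons p rest ih =>
    cases rest with
    | nil => simp [PySem.Chars.join, List.intercalate]
    | cons q r => rw [PySem.Chars.join_cons_cons, ih]; simp

theorem pv_fixGo_eq (rest : List Char) (parts : List String) :
    pvFixGo rest parts
      = String.ofList ((parts.map String.toList).flatten ++ pvSubst rest) := by
  induction hl : rest.length using Nat.strong_induction_on generalizing rest parts with
  | _ n ih =>
  rw [pvFixGo]
  split
  next h =>
    have hall : ∀ c ∈ rest, pvIsBadB c = false := by
      intro c hc
      exact List.findIdx?_eq_none_iff.mp h c hc
    have hsub : pvSubst rest = rest := by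
      unfold pvSubst
      conv_rhs => rw [← List.map_id rest]
      exact List.map_congr_left (fun c hc => by simp [hall c hc])
    rw [PySem.Str.join, show ("" : String).toList = [] from rfl, pv_join_empty]
    simp [hsub]
  next i h =>
    have hspec := List.findIdx?_eq_some_iff_findIdx_eq.mp h
    have hi : i < rest.length := hspec.1
    have hp : pvIsBadB rest[i] = true := by
      have := List.findIdx?_eq_some_iff_getElem.mp h
      exact this.2.1
    have hlt : ∀ j (hj : j < i), pvIsBadB (rest[j]'(by omega)) = false := by
      have := List.findIdx?_eq_some_iff_getElem.mp h
      intro j hj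
      simpa using this.2.2 j hj
    have hlen : (rest.drop (i + 1)).length < n := by
      simp [List.length_drop]; omega
    rw [ih _ (by omega) _ _ rfl]
    congr 1
    -- rest = take i ++ rest[i] :: drop (i+1)
    have hdecomp : rest = rest.take i ++ rest[i] :: rest.drop (i + 1) := by
      conv_lhs => rw [← List.take_append_drop i rest]
      rw [List.getElem_cons_drop hi]
    have htake : pvSubst (rest.take i) = rest.take i := by
      unfold pvSubst
      conv_rhs => rw [← List.map_id (rest.take i)]
      refine List.map_congr_left (fun c hc => ?_)
      obtain ⟨j, hj, rfl⟩ := List.mem_take_iff_getElem.mp hc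
      simp [hlt j (by omega)]
    conv_rhs => rw [hdecomp]
    unfold pvSubst
    simp only [List.map_append, List.map_cons, hp, if_pos, List.map_append,
      List.flatten_append]
    rw [← pvSubst, ← pvSubst, htake]
    simp [String.toList_ofList, List.append_assoc]

theorem pv_alt_eq (name param : String) :
    sanitize_field_name_py_alt name param
      = String.ofList (pvSubst (PySem.Str.strip name).toList) := by
  rw [sanitize_field_name_py_alt, pv_fixGo_eq]
  simp

theorem pv_bad_eq (c : Char) :
    PySem.Set.contains pvBadA c = pvIsBadB c := by
  by_cases h : c ∈ " \t\r\n\"'{}[]()@".toList <;>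
    simp [pvBadA, pvIsBadB, PySem.Set.mem_ofList]

-- ===== VERDICT (by name: the statement is the Claim_ definition above) =====
set_option maxHeartbeats 1000000 in
theorem sanitize_field_name_py_spec : Claim_equal_sanitize_field_name_py := by
  intro name param _ _
  unfold Spec_sanitize_field_name_py
  rw [pv_alt_eq]
  unfold sanitize_field_name_py
  simp only [pv_bad_eq]
  by_cases hg : ((PySem.Str.strip name).toList.any fun ch => pvIsBadB ch) = true
  · simp only [hg, if_true]
    unfold pvSubst
    congr 1
    refine List.map_congr_left (fun c _ => ?_)
    by_cases h : pvIsBadB c <;> simp [h]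
  · simp only [hg, Bool.false_eq_true, if_false]
    simp only [List.any_eq_true, not_exists, not_and] at hg
    have : pvSubst (PySem.Str.strip name).toList = (PySem.Str.strip name).toList := by
      unfold pvSubst
      conv_rhs => rw [← List.map_id (PySem.Str.strip name).toList]
      refine List.map_congr_left (fun c hc => ?_)
      have := hg c hc
      simp_all
    rw [this, String.ofList_toList]
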